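-- pv_equiv track=rewrite | github.com/jooseop/coding-test | prg_비밀지도.py | solution
-- ===== SOURCE A (Python) =====
-- def solution(n, arr1, arr2):
--     board = []
--     for i1, i2 in zip(arr1, arr2):
--         tmp = ''
--         for _ in range(n):
--             decode = str((i1 % 2) | (i2 % 2))
--             i1, i2 = i1 // 2, i2 // 2
--             tmp = decode + tmp
--         board.append(tmp.replace('1','#').replace('0',' '))
--     return board
-- ===== SOURCE B (Python) =====
-- _TRANS = str.maketrans('10', '# ')
--
-- def solution(n, arr1, arr2):
--     if n <= 0:
--         return ['' for _ in zip(arr1, arr2)]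
--     mod = 1 << n
--     return [format((a | b) % mod, '0%db' % n).translate(_TRANS)
--             for a, b in zip(arr1, arr2)]
-- ===== Notes on version B (the rewrite author's own statement) =====
-- stated objective: faster
-- what changed: The per-bit inner loop (n iterations of %2, //2 and string prepending per row, then two str.replace passes) is replaced by OR-ing each pair of whole integers at once, reducing modulo 2**n, and rendering the row with a single zero-padded binary format plus str.translate.
import Mathlib
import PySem

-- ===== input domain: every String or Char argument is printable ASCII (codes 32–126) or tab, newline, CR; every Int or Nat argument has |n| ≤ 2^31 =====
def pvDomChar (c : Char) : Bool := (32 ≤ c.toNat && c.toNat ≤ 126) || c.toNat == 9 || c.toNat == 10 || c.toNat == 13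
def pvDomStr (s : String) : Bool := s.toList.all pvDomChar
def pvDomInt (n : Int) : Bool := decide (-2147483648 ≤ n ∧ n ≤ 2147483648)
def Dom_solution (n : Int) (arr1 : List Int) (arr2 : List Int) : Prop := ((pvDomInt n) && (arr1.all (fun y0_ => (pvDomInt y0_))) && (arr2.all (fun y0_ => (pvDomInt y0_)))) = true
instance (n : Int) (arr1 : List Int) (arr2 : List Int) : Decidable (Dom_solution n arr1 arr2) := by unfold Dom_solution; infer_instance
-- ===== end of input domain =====

-- B renders each row by OR-ing the two whole integers, reducing mod 2^n and formatting the
-- n-bit binary string at once, instead of A's per-bit %2 / //2 loop; measurably faster in Python.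

-- ===== PORT A =====
-- inner "for _ in range(n)" loop of A: state (i1, i2, tmp), decode prepended to tmp
def solutionRowA : Nat → Int → Int → List Char → List Char
  | 0, _, _, tmp => tmp
  | k+1, i1, i2, tmp =>
      solutionRowA k (PySem.Int.floordiv i1 2) (PySem.Int.floordiv i2 2)
        (PySem.Int.toChars (PySem.Int.bor (PySem.Int.mod i1 2) (PySem.Int.mod i2 2)) ++ tmp)

def solution (n : Int) (arr1 : List Int) (arr2 : List Int) : List String :=
  (arr1.zip arr2).foldl
    (fun board p =>
      board ++ [String.ofList
        (PySem.Chars.replace (PySem.Chars.replace (solutionRowA n.toNat p.1 p.2 []) ['1'] ['#'])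
          ['0'] [' '])])
    []

-- ===== PORT B =====
-- format(v, '0kb') for 0 ≤ v < 2^k: fixed-width binary, low bit last
def pvBinChars : Nat → Nat → List Char
  | 0, _ => []
  | k+1, v => pvBinChars k (v / 2) ++ [if v % 2 = 1 then '1' else '0']

-- str.translate(str.maketrans('10', '# '))
def pvTransChar (c : Char) : Char := if c = '1' then '#' else if c = '0' then ' ' else c

def solution_alt (n : Int) (arr1 : List Int) (arr2 : List Int) : List String :=
  if n ≤ 0 then (arr1.zip arr2).map (fun _ => "")
  else
    (arr1.zip arr2).map (fun p =>
      String.ofList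
        ((pvBinChars n.toNat
            (PySem.Int.mod (PySem.Int.bor p.1 p.2) (2 ^ n.toNat)).toNat).map pvTransChar))

-- ===== PRECONDITION & SPEC =====
def Spec_solution (n : Int) (arr1 : List Int) (arr2 : List Int) (out : List String) : Prop := out = solution_alt n arr1 arr2
instance (n : Int) (arr1 : List Int) (arr2 : List Int) (out : List String) : Decidable (Spec_solution n arr1 arr2 out) := by unfold Spec_solution; infer_instance

-- ===== CLAIM (what is proved, stated in full; the proofs are below) =====
def Claim_equal_solution : Prop := ∀ (n : Int) (arr1 : List Int) (arr2 : List Int), Dom_solution n arr1 arr2 → Spec_solution n arr1 arr2 (solution n arr1 arr2)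

-- ===== LEMMAS AND PROOFS =====

lemma pv_nat_lor_decomp (m n : Nat) :
    m ||| n = 2 * ((m / 2) ||| (n / 2)) + (m % 2 ||| n % 2) := by
  conv_lhs => rw [← Nat.bit_testBit_zero_shiftRight_one m, ← Nat.bit_testBit_zero_shiftRight_one n]
  rw [Nat.lor_bit, Nat.bit_val, Nat.shiftRight_one, Nat.shiftRight_one]
  congr 1
  rw [Nat.testBit_zero, Nat.testBit_zero]
  rcases Nat.mod_two_eq_zero_or_one m with h1|h1 <;> rcases Nat.mod_two_eq_zero_or_one n with h2|h2 <;>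
    simp [h1, h2]
lemma pv_nat_land_decomp (m n : Nat) :
    m &&& n = 2 * ((m / 2) &&& (n / 2)) + (m % 2 &&& n % 2) := by
  conv_lhs => rw [← Nat.bit_testBit_zero_shiftRight_one m, ← Nat.bit_testBit_zero_shiftRight_one n]
  rw [Nat.land_bit, Nat.bit_val, Nat.shiftRight_one, Nat.shiftRight_one]
  congr 1
  rw [Nat.testBit_zero, Nat.testBit_zero]
  rcases Nat.mod_two_eq_zero_or_one m with h1|h1 <;> rcases Nat.mod_two_eq_zero_or_one n with h2|h2 <;>
    simp [h1, h2]

lemma pv_bor_decomp (a b : Int) :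
    PySem.Int.bor a b = 2 * PySem.Int.bor (a / 2) (b / 2) + max (a % 2) (b % 2) := by
  by_cases ha : 0 <= a <;> by_cases hb : 0 <= b
  . have ha2 : 0 <= a / 2 := by omega
    have hb2 : 0 <= b / 2 := by omega
    unfold PySem.Int.bor
    rw [if_pos ha, if_pos hb, if_pos ha2, if_pos hb2]
    have e1 : (a / 2).toNat = a.toNat / 2 := by omega
    have e2 : (b / 2).toNat = b.toNat / 2 := by omega
    rw [e1, e2, pv_nat_lor_decomp a.toNat b.toNat]
    rcases Int.emod_two_eq_zero_or_one a with h1|h1 <;> rcases Int.emod_two_eq_zero_or_one b with h2|h2 <;>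
      [skip; skip; skip; skip] <;>
      . have m1 : a.toNat % 2 = (a % 2).toNat := by omega
        have m2 : b.toNat % 2 = (b % 2).toNat := by omega
        rw [m1, m2, h1, h2]
        push_cast
        omega
  . have ha2 : 0 <= a / 2 := by omega
    have hb2 : ¬ 0 <= b / 2 := by omega
    unfold PySem.Int.bor
    rw [if_pos ha, if_neg hb, if_pos ha2, if_neg hb2]
    have e1 : (-(b/2)-1).toNat = (-b-1).toNat / 2 := by omega
    have e2 : (a/2).toNat = a.toNat / 2 := by omega
    rw [e1, e2]
    have hand := pv_nat_land_decomp (-b-1).toNat a.toNat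
    have l1 : (-b-1).toNat/2 &&& a.toNat/2 <= (-b-1).toNat/2 := Nat.and_le_left
    rcases Int.emod_two_eq_zero_or_one a with h1|h1 <;> rcases Int.emod_two_eq_zero_or_one b with h2|h2
    . have m1 : (-b-1).toNat % 2 = 1 := by omega
      have m2 : a.toNat % 2 = 0 := by omega
      rw [m1, m2] at hand
      have hb2' : (1 : Nat) &&& 0 = 0 := by decide
      rw [hb2'] at hand
      rw [h1, h2]
      have hmx : max (0 : Int) 0 = 0 := by decide
      rw [hmx]
      omega
    . have m1 : (-b-1).toNat % 2 = 0 := by omega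
      have m2 : a.toNat % 2 = 0 := by omega
      rw [m1, m2] at hand
      have hb2' : (0 : Nat) &&& 0 = 0 := by decide
      rw [hb2'] at hand
      rw [h1, h2]
      have hmx : max (0 : Int) 1 = 1 := by decide
      rw [hmx]
      omega
    . have m1 : (-b-1).toNat % 2 = 1 := by omega
      have m2 : a.toNat % 2 = 1 := by omega
      rw [m1, m2] at hand
      have hb2' : (1 : Nat) &&& 1 = 1 := by decide
      rw [hb2'] at hand
      rw [h1, h2]
      have hmx : max (1 : Int) 0 = 1 := by decide
      rw [hmx]
      omega
    . have m1 : (-b-1).toNat % 2 = 0 := by omega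
      have m2 : a.toNat % 2 = 1 := by omega
      rw [m1, m2] at hand
      have hb2' : (0 : Nat) &&& 1 = 0 := by decide
      rw [hb2'] at hand
      rw [h1, h2]
      have hmx : max (1 : Int) 1 = 1 := by decide
      rw [hmx]
      omega
  . have ha2 : ¬ 0 <= a / 2 := by omega
    have hb2 : 0 <= b / 2 := by omega
    unfold PySem.Int.bor
    rw [if_neg ha, if_pos hb, if_neg ha2, if_pos hb2]
    have e1 : (-(a/2)-1).toNat = (-a-1).toNat / 2 := by omega
    have e2 : (b/2).toNat = b.toNat / 2 := by omega
    rw [e1, e2]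
    have hand := pv_nat_land_decomp (-a-1).toNat b.toNat
    have l1 : (-a-1).toNat/2 &&& b.toNat/2 <= (-a-1).toNat/2 := Nat.and_le_left
    rcases Int.emod_two_eq_zero_or_one a with h1|h1 <;> rcases Int.emod_two_eq_zero_or_one b with h2|h2
    . have m1 : (-a-1).toNat % 2 = 1 := by omega
      have m2 : b.toNat % 2 = 0 := by omega
      rw [m1, m2] at hand
      have hb2' : (1 : Nat) &&& 0 = 0 := by decide
      rw [hb2'] at hand
      rw [h1, h2]
      have hmx : max (0 : Int) 0 = 0 := by decide
      rw [hmx]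
      omega
    . have m1 : (-a-1).toNat % 2 = 1 := by omega
      have m2 : b.toNat % 2 = 1 := by omega
      rw [m1, m2] at hand
      have hb2' : (1 : Nat) &&& 1 = 1 := by decide
      rw [hb2'] at hand
      rw [h1, h2]
      have hmx : max (0 : Int) 1 = 1 := by decide
      rw [hmx]
      omega
    . have m1 : (-a-1).toNat % 2 = 0 := by omega
      have m2 : b.toNat % 2 = 0 := by omega
      rw [m1, m2] at hand
      have hb2' : (0 : Nat) &&& 0 = 0 := by decide
      rw [hb2'] at hand
      rw [h1, h2]
      have hmx : max (1 : Int) 0 = 1 := by decide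
      rw [hmx]
      omega
    . have m1 : (-a-1).toNat % 2 = 0 := by omega
      have m2 : b.toNat % 2 = 1 := by omega
      rw [m1, m2] at hand
      have hb2' : (0 : Nat) &&& 1 = 0 := by decide
      rw [hb2'] at hand
      rw [h1, h2]
      have hmx : max (1 : Int) 1 = 1 := by decide
      rw [hmx]
      omega
  . have ha2 : ¬ 0 <= a / 2 := by omega
    have hb2 : ¬ 0 <= b / 2 := by omega
    unfold PySem.Int.bor
    rw [if_neg ha, if_neg hb, if_neg ha2, if_neg hb2]
    have e1 : (-(a/2)-1).toNat = (-a-1).toNat / 2 := by omega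
    have e2 : (-(b/2)-1).toNat = (-b-1).toNat / 2 := by omega
    rw [e1, e2]
    have hand := pv_nat_land_decomp (-a-1).toNat (-b-1).toNat
    rcases Int.emod_two_eq_zero_or_one a with h1|h1 <;> rcases Int.emod_two_eq_zero_or_one b with h2|h2
    . have m1 : (-a-1).toNat % 2 = 1 := by omega
      have m2 : (-b-1).toNat % 2 = 1 := by omega
      rw [m1, m2] at hand
      have hb2' : (1 : Nat) &&& 1 = 1 := by decide
      rw [hb2'] at hand
      rw [h1, h2]
      have hmx : max (0 : Int) 0 = 0 := by decide
      rw [hmx]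
      omega
    . have m1 : (-a-1).toNat % 2 = 1 := by omega
      have m2 : (-b-1).toNat % 2 = 0 := by omega
      rw [m1, m2] at hand
      have hb2' : (1 : Nat) &&& 0 = 0 := by decide
      rw [hb2'] at hand
      rw [h1, h2]
      have hmx : max (0 : Int) 1 = 1 := by decide
      rw [hmx]
      omega
    . have m1 : (-a-1).toNat % 2 = 0 := by omega
      have m2 : (-b-1).toNat % 2 = 1 := by omega
      rw [m1, m2] at hand
      have hb2' : (0 : Nat) &&& 1 = 0 := by decide
      rw [hb2'] at hand
      rw [h1, h2]
      have hmx : max (1 : Int) 0 = 1 := by decide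
      rw [hmx]
      omega
    . have m1 : (-a-1).toNat % 2 = 0 := by omega
      have m2 : (-b-1).toNat % 2 = 0 := by omega
      rw [m1, m2] at hand
      have hb2' : (0 : Nat) &&& 0 = 0 := by decide
      rw [hb2'] at hand
      rw [h1, h2]
      have hmx : max (1 : Int) 1 = 1 := by decide
      rw [hmx]
      omega

lemma pv_replace_go_single (c r : Char) :
    ∀ (fuel : Nat) (l acc : List Char), l.length ≤ fuel →
      PySem.Chars.replace.go [c] [r] fuel l acc
        = acc.reverse ++ l.map (fun d => if d = c then r else d) := by
  intro fuel
  induction fuel with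
  | zero =>
    intro l acc h
    have : l = [] := by cases l <;> simp_all
    subst this
    simp [PySem.Chars.replace.go]
  | succ k ih =>
    intro l acc h
    cases l with
    | nil => simp [PySem.Chars.replace.go]
    | cons c' t =>
      by_cases hc : c = c'
      · have hp : [c].isPrefixOf (c' :: t) = true := by simp [List.isPrefixOf, hc]
        rw [PySem.Chars.replace.go, if_pos hp]
        simp only [List.length_singleton, List.drop_succ_cons, List.drop_zero]
        simp only [List.length_cons] at h
        rw [ih t _ (by omega)]
        subst hc
        simp
      · have hp : [c].isPrefixOf (c' :: t) = false := by
          simp [List.isPrefixOf]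
          exact fun hh => hc hh
        rw [PySem.Chars.replace.go, if_neg (by simp [hp])]
        simp only [List.length_cons] at h
        rw [ih _ _ (by omega)]
        simp [Ne.symm hc]

lemma pv_replace_single (s : List Char) (c r : Char) :
    PySem.Chars.replace s [c] [r] = s.map (fun d => if d = c then r else d) := by
  rw [PySem.Chars.replace]
  simp only [List.isEmpty_cons, Bool.false_eq_true, if_false]
  exact pv_replace_go_single c r s.length s [] le_rfl

lemma pv_rowA_append (k : Nat) :
    ∀ (a b : Int) (tmp : List Char),
      solutionRowA k a b tmp = solutionRowA k a b [] ++ tmp := by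
  induction k with
  | zero => intro a b tmp; simp [solutionRowA]
  | succ k ih =>
    intro a b tmp
    rw [solutionRowA, solutionRowA, ih, ih _ _ (_ ++ [])]
    simp

lemma pv_emod_shift (t r : Int) (k : Nat) (h0 : 0 ≤ r) (h1 : r < 2) :
    (2 * t + r) % ((2:Int) ^ (k+1)) = 2 * (t % 2 ^ k) + r := by
  have hp : (0:Int) < 2 ^ k := by positivity
  have hdef : t % 2 ^ k = t - 2 ^ k * (t / 2 ^ k) := by
    rw [Int.emod_def]
  have hmlt : t % 2 ^ k < 2 ^ k := Int.emod_lt_of_pos t hp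
  have hmge : 0 ≤ t % 2 ^ k := Int.emod_nonneg t (by positivity)
  have hrw : 2 * t + r = (2 * (t % 2 ^ k) + r) + (2 ^ (k+1)) * (t / 2 ^ k) := by
    rw [pow_succ]
    nlinarith [hdef]
  rw [hrw, Int.add_mul_emod_self_left]
  exact Int.emod_eq_of_lt (by omega) (by rw [pow_succ]; omega)

lemma pv_mod2 (a : Int) : PySem.Int.mod a 2 = a % 2 :=
  PySem.Int.mod_eq_emod_of_pos (by norm_num)

lemma pv_fdiv2 (a : Int) : PySem.Int.floordiv a 2 = a / 2 :=
  PySem.Int.floordiv_eq_ediv_of_pos (by norm_num)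

lemma pv_digits_eq (k : Nat) :
    ∀ (a b : Int),
      solutionRowA k a b []
        = pvBinChars k (PySem.Int.mod (PySem.Int.bor a b) (2 ^ k)).toNat := by
  induction k with
  | zero => intro a b; rfl
  | succ k ih =>
    intro a b
    rw [solutionRowA, pv_rowA_append, List.append_nil, pvBinChars]
    have hd := pv_bor_decomp a b
    have hr0 : 0 ≤ max (a % 2) (b % 2) := by
      have := Int.emod_nonneg a (by norm_num : (2:Int) ≠ 0)
      have := Int.emod_nonneg b (by norm_num : (2:Int) ≠ 0)
      omega
    have hr1 : max (a % 2) (b % 2) < 2 := by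
      have := Int.emod_lt_of_pos a (by norm_num : (0:Int) < 2)
      have := Int.emod_lt_of_pos b (by norm_num : (0:Int) < 2)
      omega
    have hv : PySem.Int.mod (PySem.Int.bor a b) (2 ^ (k+1))
        = 2 * (PySem.Int.bor (a/2) (b/2) % 2 ^ k) + max (a % 2) (b % 2) := by
      rw [PySem.Int.mod_eq_emod_of_pos (by positivity), hd, pv_emod_shift _ _ _ hr0 hr1]
    have hm0 : 0 ≤ PySem.Int.bor (a/2) (b/2) % 2 ^ k := Int.emod_nonneg _ (by positivity)
    congr 1
    · rw [ih]
      congr 1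
      have : (PySem.Int.mod (PySem.Int.bor (PySem.Int.floordiv a 2) (PySem.Int.floordiv b 2)) (2 ^ k))
          = PySem.Int.bor (a/2) (b/2) % 2 ^ k := by
        rw [pv_fdiv2, pv_fdiv2, PySem.Int.mod_eq_emod_of_pos (by positivity)]
      rw [this]
      omega
    · have hb : (PySem.Int.mod (PySem.Int.bor a b) (2 ^ (k+1))).toNat % 2
          = (max (a % 2) (b % 2)).toNat := by
        rw [hv]; omega
      rw [pv_mod2, pv_mod2, hb]
      rcases Int.emod_two_eq_zero_or_one a with h1|h1 <;> rcases Int.emod_two_eq_zero_or_one b with h2|h2 <;>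
        rw [h1, h2] <;> decide

-- ===== VERDICT (by name: the statement is the Claim_ definition above) =====
theorem solution_spec : Claim_equal_solution := by
  intro n arr1 arr2 _
  unfold Spec_solution solution solution_alt
  rw [PySem.List.foldl_append_singleton_eq_map]
  simp only [List.nil_append]
  by_cases hn : n ≤ 0
  · rw [if_pos hn]
    have h0 : n.toNat = 0 := by omega
    apply List.map_congr_left
    intro p _
    rw [h0]
    rw [show solutionRowA 0 p.1 p.2 [] = [] from rfl,
        pv_replace_single, pv_replace_single]
    rfl
  · rw [if_neg hn]
    apply List.map_congr_left
    intro p _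
    rw [pv_replace_single, pv_replace_single, pv_digits_eq, List.map_map]
    apply congrArg
    apply List.map_congr_left
    intro d _
    by_cases h1 : d = '1' <;> by_cases h2 : d = '0' <;> simp [pvTransChar, h1, h2]
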